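-- pv_equiv track=rewrite | github.com/DataDog/integrations-core | tibco_ems/datadog_checks/tibco_ems/tibco_ems.py | _section_output
-- ===== SOURCE A (Python) =====
-- def _section_output(output):
--     '''
--     Split the output into sections based on the command
--     '''
--     sections = {}
--     current_command = None
--     current_section = []
--
--     for line in output.strip().split('\n'):
--         if line.startswith("Command:"):
--             if current_command:
--                 sections[current_command] = "\n".join(current_section)
--             current_command = line.split("Command:")[1].strip()
--             current_section = []
--         elif current_command:
--             current_section.append(line)
--
--     if current_command:
--         sections[current_command] = "\n".join(current_section)
--
--     return sections
-- ===== SOURCE B (Python) =====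
-- def _section_output(output):
--     '''
--     Split the output into sections based on the command
--     '''
--     lines = output.strip().split('\n')
--     starts = [i for i, line in enumerate(lines) if line.startswith("Command:")]
--     sections = {}
--     for k, start in enumerate(starts):
--         command = lines[start].split("Command:")[1].strip()
--         if command:
--             end = starts[k + 1] if k + 1 < len(starts) else len(lines)
--             sections[command] = "\n".join(lines[start + 1:end])
--     return sections
-- ===== Notes on version B (the rewrite author's own statement) =====
-- stated objective: alternative
-- what changed: Replaces the current_command/current_section state machine (with trailing flush) by a two-pass index table: first collect the indices of all command-delimiter lines, then build each section by slicing the line list between consecutive delimiter indices.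
import Mathlib
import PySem

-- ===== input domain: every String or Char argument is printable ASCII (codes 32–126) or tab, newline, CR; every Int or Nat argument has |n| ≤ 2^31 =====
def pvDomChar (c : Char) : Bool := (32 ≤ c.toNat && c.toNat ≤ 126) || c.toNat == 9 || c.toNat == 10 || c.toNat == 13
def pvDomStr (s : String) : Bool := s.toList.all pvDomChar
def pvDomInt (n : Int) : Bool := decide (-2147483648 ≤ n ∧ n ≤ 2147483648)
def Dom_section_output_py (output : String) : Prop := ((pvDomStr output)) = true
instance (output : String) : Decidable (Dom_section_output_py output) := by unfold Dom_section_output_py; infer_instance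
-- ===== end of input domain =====

-- B replaces A's current_command/current_section state machine (with trailing flush) by a two-pass
-- index table over the delimiter lines plus slicing; same O(n) cost, different decomposition.

-- ===== PORT A =====
-- Python truthiness of an Optional[str]: None and "" are falsy
def pyTruthyStrOpt : Option String → Bool
  | none => false
  | some s => s != ""

def section_output_py (output : String) : List (String × String) :=
  let r : PySem.Dict String String × Option String × List String := ((PySem.Str.split? (PySem.Str.strip output) "\n").getD []).foldl
    (fun (st : PySem.Dict String String × Option String × List String) line =>
      let sections := st.1
      let currentCommand := st.2.1
      let currentSection := st.2.2
      if PySem.Str.startswith line "Command:" then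
        let sections := if pyTruthyStrOpt currentCommand then
            PySem.Dict.insert sections (currentCommand.getD "") (PySem.Str.join "\n" currentSection)
          else sections
        (sections,
         some (PySem.Str.strip ((PySem.List.pyGet? ((PySem.Str.split? line "Command:").getD []) 1).getD "")),
         ([] : List String))
      else if pyTruthyStrOpt currentCommand then
        (sections, currentCommand, currentSection ++ [line])
      else
        (sections, currentCommand, currentSection))
    ((PySem.Dict.empty : PySem.Dict String String), (none : Option String), ([] : List String))
  (if pyTruthyStrOpt r.2.1 then
      PySem.Dict.insert r.1 (r.2.1.getD "") (PySem.Str.join "\n" r.2.2)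
    else r.1).items

-- ===== PORT B =====
def section_output_py_alt (output : String) : List (String × String) :=
  let lines := (PySem.Str.split? (PySem.Str.strip output) "\n").getD []
  let starts := ((PySem.List.enumerate lines).filter
      (fun p => PySem.Str.startswith p.2 "Command:")).map (·.1)
  ((PySem.List.enumerate starts).foldl
    (fun (sections : PySem.Dict String String) p =>
      let command := PySem.Str.strip ((PySem.List.pyGet?
        ((PySem.Str.split? ((PySem.List.pyGet? lines p.2).getD "") "Command:").getD []) 1).getD "")
      if command != "" then
        let e := if p.1 + 1 < PySem.List.len starts then (PySem.List.pyGet? starts (p.1 + 1)).getD 0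
                 else PySem.List.len lines
        PySem.Dict.insert sections command
          (PySem.Str.join "\n" (PySem.List.slice lines (some (p.2 + 1)) (some e)))
      else sections)
    (PySem.Dict.empty : PySem.Dict String String)).items

-- ===== PRECONDITION & SPEC =====
def Spec_section_output_py (output : String) (out : List (String × String)) : Prop := out = section_output_py_alt output
instance (output : String) (out : List (String × String)) : Decidable (Spec_section_output_py output out) := by unfold Spec_section_output_py; infer_instance

-- ===== CLAIM (what is proved, stated in full; the proofs are below) =====
def Claim_equal_section_output_py : Prop := ∀ (output : String), Dom_section_output_py output → Spec_section_output_py output (section_output_py output)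

-- ===== LEMMAS AND PROOFS =====

-- delimiter test and command extraction shared by the proofs
def pvDel (l : String) : Bool := PySem.Str.startswith l "Command:"
def pvCmd (l : String) : String :=
  PySem.Str.strip ((PySem.List.pyGet? ((PySem.Str.split? l "Command:").getD []) 1).getD "")

-- common structural spec: consume one delimiter-led group at a time
def pvGo : List String → PySem.Dict String String → PySem.Dict String String
  | [], d => d
  | l :: rest, d =>
      pvGo (rest.dropWhile (fun x => !pvDel x))
        (if pvCmd l != "" then
          PySem.Dict.insert d (pvCmd l) (PySem.Str.join "\n" (rest.takeWhile (fun x => !pvDel x)))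
         else d)
  termination_by l _ => l.length
  decreasing_by exact Nat.lt_succ_of_le (List.length_dropWhile_le _ _)

-- A's loop body and trailing flush, named for the proofs
def pvStepA (st : PySem.Dict String String × Option String × List String) (line : String) :
    PySem.Dict String String × Option String × List String :=
  if PySem.Str.startswith line "Command:" then
    ((if pyTruthyStrOpt st.2.1 then
        PySem.Dict.insert st.1 (st.2.1.getD "") (PySem.Str.join "\n" st.2.2)
      else st.1),
     some (pvCmd line), [])
  else if pyTruthyStrOpt st.2.1 then
    (st.1, st.2.1, st.2.2 ++ [line])
  else
    (st.1, st.2.1, st.2.2)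

def pvFlush (d : PySem.Dict String String) (cc : Option String) (cs : List String) :
    PySem.Dict String String :=
  if pyTruthyStrOpt cc then PySem.Dict.insert d (cc.getD "") (PySem.Str.join "\n" cs) else d

lemma sectionA_eq (output : String) :
    section_output_py output =
      (pvFlush ((((PySem.Str.split? (PySem.Str.strip output) "\n").getD []).foldl pvStepA
          (PySem.Dict.empty, none, [])).1)
        ((((PySem.Str.split? (PySem.Str.strip output) "\n").getD []).foldl pvStepA
          (PySem.Dict.empty, none, [])).2.1)
        ((((PySem.Str.split? (PySem.Str.strip output) "\n").getD []).foldl pvStepA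
          (PySem.Dict.empty, none, [])).2.2)).items := by
  simp only [section_output_py]
  delta pvStepA pvCmd pvFlush
  rfl

lemma foldA_eq_go (lines : List String) :
    ∀ (d : PySem.Dict String String) (cc : Option String) (cs : List String),
      pvFlush (lines.foldl pvStepA (d, cc, cs)).1 (lines.foldl pvStepA (d, cc, cs)).2.1
          (lines.foldl pvStepA (d, cc, cs)).2.2 =
        pvGo (lines.dropWhile (fun x => !pvDel x))
          (pvFlush d cc (cs ++ lines.takeWhile (fun x => !pvDel x))) := by
  induction lines with
  | nil => intro d cc cs; simp [pvGo, pvFlush]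
  | cons l t ih =>
    intro d cc cs
    by_cases hl : pvDel l = true
    · have hl' : PySem.Str.startswith l "Command:" = true := hl
      have h1 : pvStepA (d, cc, cs) l = (pvFlush d cc cs, some (pvCmd l), []) := by
        simp only [pvStepA]; rw [hl']; simp [pvFlush, pvCmd]
      rw [List.foldl_cons, h1, ih]
      have hdw : (l :: t).dropWhile (fun x => !pvDel x) = l :: t := by
        simp [hl]
      have htw : (l :: t).takeWhile (fun x => !pvDel x) = [] := by
        simp [hl]
      rw [hdw, htw, List.append_nil, pvGo]
      congr 1
    · have hl' : PySem.Str.startswith l "Command:" = false := by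
        simpa [pvDel] using hl
      have hdw : (l :: t).dropWhile (fun x => !pvDel x) = t.dropWhile (fun x => !pvDel x) := by
        simp [hl]
      have htw : (l :: t).takeWhile (fun x => !pvDel x) = l :: t.takeWhile (fun x => !pvDel x) := by
        simp [hl]
      by_cases hcc : pyTruthyStrOpt cc = true
      · have h1 : pvStepA (d, cc, cs) l = (d, cc, cs ++ [l]) := by
          simp only [pvStepA]; rw [hl']; simp [hcc]
        rw [List.foldl_cons, h1, ih, hdw, htw]
        congr 1
        simp [List.append_assoc]
      · have hcc' : pyTruthyStrOpt cc = false := by simpa using hcc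
        have h1 : pvStepA (d, cc, cs) l = (d, cc, cs) := by
          simp only [pvStepA]; rw [hl']; simp [hcc']
        rw [List.foldl_cons, h1, ih, hdw, htw]
        congr 1
        simp [pvFlush, hcc']

-- B-side abstractions
def pvStarts (lines : List String) : List Int :=
  ((PySem.List.enumerate lines).filter (fun p => PySem.Str.startswith p.2 "Command:")).map (·.1)

def pvStepB (lines : List String) (starts : List Int) (sections : PySem.Dict String String)
    (p : Int × Int) : PySem.Dict String String :=
  if pvCmd ((PySem.List.pyGet? lines p.2).getD "") != "" then
    PySem.Dict.insert sections (pvCmd ((PySem.List.pyGet? lines p.2).getD ""))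
      (PySem.Str.join "\n" (PySem.List.slice lines (some (p.2 + 1))
        (some (if p.1 + 1 < PySem.List.len starts then (PySem.List.pyGet? starts (p.1 + 1)).getD 0
               else PySem.List.len lines))))
  else sections

lemma sectionB_eq (output : String) :
    section_output_py_alt output =
      ((PySem.List.enumerate (pvStarts ((PySem.Str.split? (PySem.Str.strip output) "\n").getD []))).foldl
        (pvStepB ((PySem.Str.split? (PySem.Str.strip output) "\n").getD [])
          (pvStarts ((PySem.Str.split? (PySem.Str.strip output) "\n").getD [])))
        PySem.Dict.empty).items := by
  rfl

lemma pvDropWhileHead {α : Type} (p : α → Bool) (xs : List α) (y : α) (ys : List α)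
    (h : xs.dropWhile p = y :: ys) : p y = false := by
  induction xs with
  | nil => simp at h
  | cons a t ih =>
    rw [List.dropWhile_cons] at h
    by_cases hpa : p a = true
    · rw [if_pos hpa] at h
      exact ih h
    · rw [if_neg hpa] at h
      obtain ⟨rfl, -⟩ := List.cons.inj h
      simpa using hpa

lemma pvEnumShift {α : Type} (xs : List α) (s : Int) :
    PySem.List.enumerate xs s = (PySem.List.enumerate xs 0).map (fun q => (q.1 + s, q.2)) := by
  simp only [PySem.List.enumerate_eq_zipIdx_map, List.map_map]
  congr 1
  funext p
  simp [Int.add_comm]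

lemma pvEnumMap {α β : Type} (f : α → β) (xs : List α) (s : Int) :
    PySem.List.enumerate (xs.map f) s = (PySem.List.enumerate xs s).map (fun q => (q.1, f q.2)) := by
  simp [PySem.List.enumerate_eq_zipIdx_map, List.zipIdx_map, Function.comp]

lemma pvStarts_nil (xs : List String) (h : ∀ x ∈ xs, pvDel x = false) : pvStarts xs = [] := by
  unfold pvStarts
  rw [List.filter_eq_nil_iff.2, List.map_nil]
  intro a ha
  rw [PySem.List.mem_enumerate_iff] at ha
  obtain ⟨k, hk, rfl⟩ := ha
  have hx := h _ (List.getElem_mem hk)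
  simp only [pvDel] at hx
  simpa using hx

lemma pvStarts_decomp (pre : List String) (l : String) (rest : List String)
    (hpre : ∀ x ∈ pre, pvDel x = false) (hl : pvDel l = true) :
    pvStarts (pre ++ l :: rest) =
      (pre.length : Int) :: (pvStarts rest).map (· + ((pre.length : Int) + 1)) := by
  have h1 : (PySem.List.enumerate pre 0).filter
      (fun p => PySem.Str.startswith p.2 "Command:") = [] := by
    rw [List.filter_eq_nil_iff]
    intro a ha
    rw [PySem.List.mem_enumerate_iff] at ha
    obtain ⟨k, hk, rfl⟩ := ha
    have hx := hpre _ (List.getElem_mem hk)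
    simp only [pvDel] at hx
    simpa using hx
  have hl' : PySem.Str.startswith l "Command:" = true := hl
  unfold pvStarts
  rw [PySem.List.enumerate_append, List.filter_append, h1, List.nil_append,
    PySem.List.enumerate_cons, List.filter_cons, if_pos (by exact hl'),
    pvEnumShift rest (0 + (pre.length : Int) + 1), List.filter_map, List.map_cons,
    List.map_map, List.map_map]
  simp [Function.comp_def]

lemma pvStarts_natCast (xs : List String) :
    ∀ x ∈ pvStarts xs, ∃ j : Nat, j < xs.length ∧ x = (j : Int) := by
  intro x hx
  unfold pvStarts at hx
  simp only [List.mem_map, List.mem_filter] at hx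
  obtain ⟨p, ⟨hp, -⟩, rfl⟩ := hx
  rw [PySem.List.mem_enumerate_iff] at hp
  obtain ⟨k, hk, rfl⟩ := hp
  exact ⟨k, hk, by simp⟩

lemma pvDropRest (pre : List String) (l : String) (rest : List String) :
    List.drop (pre.length + 1) (pre ++ l :: rest) = rest := by
  rw [List.append_cons]
  have h := List.drop_left (l₁ := pre ++ [l]) (l₂ := rest)
  simp only [List.length_append, List.length_cons, List.length_nil] at h
  exact h

lemma pvGet_shift (pre : List String) (l : String) (rest : List String) (j : Nat) :
    PySem.List.pyGet? (pre ++ l :: rest) ((j : Int) + ((pre.length : Int) + 1)) =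
      PySem.List.pyGet? rest (j : Int) := by
  have h : ((j : Int) + ((pre.length : Int) + 1)) = ((j + (pre.length + 1) : Nat) : Int) := by
    push_cast
    ring
  rw [h, PySem.List.pyGet?_natCast, PySem.List.pyGet?_natCast, List.append_cons,
    List.getElem?_append_right (by simp)]
  congr 1
  simp

lemma pvSlice_shift (pre : List String) (l : String) (rest : List String) (j e : Nat) :
    PySem.List.slice (pre ++ l :: rest) (some ((j : Int) + ((pre.length : Int) + 1) + 1))
        (some ((e : Int) + ((pre.length : Int) + 1))) =
      PySem.List.slice rest (some ((j : Int) + 1)) (some (e : Int)) := by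
  have h1 : (j : Int) + ((pre.length : Int) + 1) + 1 = ((pre.length + 1 + (j + 1) : Nat) : Int) := by
    push_cast; ring
  have h2 : (e : Int) + ((pre.length : Int) + 1) = ((pre.length + 1 + e : Nat) : Int) := by
    push_cast; ring
  have h3 : (j : Int) + 1 = ((j + 1 : Nat) : Int) := by push_cast; ring
  rw [h1, h2, h3, PySem.List.slice_natCast, PySem.List.slice_natCast,
    ← List.drop_drop, pvDropRest]
  congr 1
  omega

lemma pvStepB_shift (pre : List String) (l : String) (rest : List String)
    (hpre : ∀ x ∈ pre, pvDel x = false) (hl : pvDel l = true)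
    (d : PySem.Dict String String) (k j : Nat) (hk : k < (pvStarts rest).length) :
    pvStepB (pre ++ l :: rest) (pvStarts (pre ++ l :: rest)) d
        ((k : Int) + 1, (j : Int) + ((pre.length : Int) + 1)) =
      pvStepB rest (pvStarts rest) d ((k : Int), (j : Int)) := by
  unfold pvStepB
  rw [pvGet_shift]
  rw [pvStarts_decomp pre l rest hpre hl]
  by_cases hc : (k : Int) + 1 < PySem.List.len (pvStarts rest)
  · have hk1 : k + 1 < (pvStarts rest).length := by
      simp only [PySem.List.len_eq] at hc; omega
    have hcL : ((k : Int) + 1) + 1 <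
        PySem.List.len ((pre.length : Int) ::
          (pvStarts rest).map (· + ((pre.length : Int) + 1))) := by
      simp only [PySem.List.len_eq, List.length_cons, List.length_map]
      push_cast
      omega
    rw [if_pos hcL, if_pos hc]
    obtain ⟨j', hj', hTj'⟩ := pvStarts_natCast rest _ (List.getElem_mem hk1)
    have hgR : (PySem.List.pyGet? (pvStarts rest) ((k : Int) + 1)).getD 0 = (j' : Int) := by
      have hcast : (k : Int) + 1 = ((k + 1 : Nat) : Int) := by push_cast [Nat.cast_add]; ring
      rw [hcast, PySem.List.pyGet?_natCast, List.getElem?_eq_getElem hk1, hTj']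
      rfl
    have hgL : (PySem.List.pyGet?
        ((pre.length : Int) :: (pvStarts rest).map (· + ((pre.length : Int) + 1)))
        ((k : Int) + 1 + 1)).getD 0 = (j' : Int) + ((pre.length : Int) + 1) := by
      have hcast : (k : Int) + 1 + 1 = ((k + 1 : Nat) : Int) + 1 := by push_cast; ring
      rw [hcast, PySem.List.pyGet?_cons_succ, PySem.List.pyGet?_natCast,
        List.getElem?_map, List.getElem?_eq_getElem hk1, hTj']
      rfl
    rw [hgR, hgL, pvSlice_shift]
  · have hcL : ¬ (((k : Int) + 1) + 1 <
        PySem.List.len ((pre.length : Int) ::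
          (pvStarts rest).map (· + ((pre.length : Int) + 1)))) := by
      simp only [PySem.List.len_eq, List.length_cons, List.length_map]
      simp only [PySem.List.len_eq] at hc
      push_cast at hc ⊢
      omega
    rw [if_neg hcL, if_neg hc]
    have hlenL : PySem.List.len (pre ++ l :: rest) =
        ((rest.length : Nat) : Int) + ((pre.length : Int) + 1) := by
      simp [PySem.List.len_eq]
      ring
    have hlenR : PySem.List.len rest = ((rest.length : Nat) : Int) := by
      simp [PySem.List.len_eq]
    rw [hlenL, hlenR, pvSlice_shift]

lemma pvStepB_first (pre : List String) (l : String) (rest : List String)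
    (hpre : ∀ x ∈ pre, pvDel x = false) (hl : pvDel l = true)
    (d : PySem.Dict String String) :
    pvStepB (pre ++ l :: rest) (pvStarts (pre ++ l :: rest)) d (0, (pre.length : Int)) =
      (if pvCmd l != "" then
        PySem.Dict.insert d (pvCmd l)
          (PySem.Str.join "\n" (rest.takeWhile (fun x => !pvDel x)))
       else d) := by
  unfold pvStepB
  rw [PySem.List.pyGet?_append_length]
  rw [pvStarts_decomp pre l rest hpre hl]
  have hdrop : List.drop (pre.length + 1) (pre ++ l :: rest) = rest := pvDropRest pre l rest
  cases hdw2 : rest.dropWhile (fun x => !pvDel x) with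
  | nil =>
    have hT : pvStarts rest = [] := by
      apply pvStarts_nil
      intro x hx
      have := List.dropWhile_eq_nil_iff.1 hdw2 x hx
      simpa using this
    have htw : rest.takeWhile (fun x => !pvDel x) = rest := by
      conv_lhs => rw [← List.append_nil (rest.takeWhile (fun x => !pvDel x)), ← hdw2]
      exact List.takeWhile_append_dropWhile
    rw [hT, List.map_nil]
    rw [if_neg (show ¬((0 : Int) + 1 <
      PySem.List.len [(pre.length : Int)]) from by simp [PySem.List.len_eq])]
    have hsl : PySem.List.slice (pre ++ l :: rest) (some ((pre.length : Int) + 1))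
        (some (PySem.List.len (pre ++ l :: rest))) = rest := by
      have h1 : (pre.length : Int) + 1 = ((pre.length + 1 : Nat) : Int) := by push_cast; ring
      have h2 : PySem.List.len (pre ++ l :: rest) =
          ((pre.length + 1 + rest.length : Nat) : Int) := by
        simp [PySem.List.len_eq]; ring
      rw [h1, h2, PySem.List.slice_natCast, hdrop]
      simp
    rw [hsl, htw]
    rfl
  | cons l' rest' =>
    have hsplit2 : rest.takeWhile (fun x => !pvDel x) ++ l' :: rest' = rest := by
      conv_rhs => rw [← List.takeWhile_append_dropWhile (p := fun x => !pvDel x) (l := rest)]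
      rw [hdw2]
    have hl2 : pvDel l' = true := by
      have := pvDropWhileHead (fun x => !pvDel x) rest l' rest' hdw2
      simpa using this
    have hpre2 : ∀ x ∈ rest.takeWhile (fun x => !pvDel x), pvDel x = false := by
      intro x hx
      have := List.mem_takeWhile_imp hx
      simpa using this
    have hT : pvStarts rest = ((rest.takeWhile (fun x => !pvDel x)).length : Int) ::
        (pvStarts rest').map (· + (((rest.takeWhile (fun x => !pvDel x)).length : Int) + 1)) := by
      conv_lhs => rw [← hsplit2]
      exact pvStarts_decomp _ l' rest' hpre2 hl2
    rw [hT]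
    rw [if_pos (show (0 : Int) + 1 <
      PySem.List.len ((pre.length : Int) ::
        ((((rest.takeWhile (fun x => !pvDel x)).length : Int) ::
          (pvStarts rest').map (· + (((rest.takeWhile (fun x => !pvDel x)).length : Int) + 1))).map
            (· + ((pre.length : Int) + 1)))) from by
      simp [PySem.List.len_eq])]
    have hg : (PySem.List.pyGet?
        ((pre.length : Int) :: (((rest.takeWhile (fun x => !pvDel x)).length : Int) ::
            (pvStarts rest').map (· + (((rest.takeWhile (fun x => !pvDel x)).length : Int) + 1))).map
          (· + ((pre.length : Int) + 1)))
        (0 + 1)).getD 0 =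
        ((rest.takeWhile (fun x => !pvDel x)).length : Int) + ((pre.length : Int) + 1) := by
      have hcast : (0 : Int) + 1 = ((0 : Nat) : Int) + 1 := by norm_num
      rw [hcast, PySem.List.pyGet?_cons_succ, List.map_cons, PySem.List.pyGet?_natCast]
      rfl
    rw [hg]
    have hsl : PySem.List.slice (pre ++ l :: rest) (some ((pre.length : Int) + 1))
        (some (((rest.takeWhile (fun x => !pvDel x)).length : Int) + ((pre.length : Int) + 1))) =
        rest.takeWhile (fun x => !pvDel x) := by
      have h1 : (pre.length : Int) + 1 = ((pre.length + 1 : Nat) : Int) := by push_cast; ring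
      have h2 : ((rest.takeWhile (fun x => !pvDel x)).length : Int) + ((pre.length : Int) + 1) =
          ((pre.length + 1 + (rest.takeWhile (fun x => !pvDel x)).length : Nat) : Int) := by
        push_cast; ring
      rw [h2, h1, PySem.List.slice_natCast, hdrop]
      have : rest.take (rest.takeWhile (fun x => !pvDel x)).length =
          rest.takeWhile (fun x => !pvDel x) :=
        (List.prefix_iff_eq_take.1 (List.takeWhile_prefix _)).symm
      rw [show pre.length + 1 + (rest.takeWhile (fun x => !pvDel x)).length - (pre.length + 1) =
        (rest.takeWhile (fun x => !pvDel x)).length from by omega, this]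
    rw [hsl]
    rfl

lemma foldB_eq_go : ∀ (n : Nat) (lines : List String), lines.length ≤ n →
    ∀ (d : PySem.Dict String String),
      (PySem.List.enumerate (pvStarts lines)).foldl (pvStepB lines (pvStarts lines)) d =
        pvGo (lines.dropWhile (fun x => !pvDel x)) d := by
  intro n
  induction n with
  | zero =>
    intro lines hlen d
    have : lines = [] := List.length_eq_zero_iff.1 (Nat.le_zero.1 hlen)
    subst this
    simp [pvStarts, pvGo, PySem.List.enumerate]
  | succ n ih =>
    intro lines hlen d
    cases hdw : lines.dropWhile (fun x => !pvDel x) with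
    | nil =>
      have hall : ∀ x ∈ lines, pvDel x = false := by
        intro x hx
        have := List.dropWhile_eq_nil_iff.1 hdw x hx
        simpa using this
      rw [pvStarts_nil lines hall]
      simp [pvGo, PySem.List.enumerate]
    | cons l rest =>
      have hsplit : lines.takeWhile (fun x => !pvDel x) ++ l :: rest = lines := by
        conv_rhs => rw [← List.takeWhile_append_dropWhile (p := fun x => !pvDel x) (l := lines)]
        rw [hdw]
      have hl : pvDel l = true := by
        have := pvDropWhileHead (fun x => !pvDel x) lines l rest hdw
        simpa using this
      have hpre : ∀ x ∈ lines.takeWhile (fun x => !pvDel x), pvDel x = false := by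
        intro x hx
        have := List.mem_takeWhile_imp hx
        simpa using this
      have hrestlen : rest.length ≤ n := by
        have : lines.length = (lines.takeWhile (fun x => !pvDel x)).length + (rest.length + 1) := by
          conv_lhs => rw [← hsplit]
          simp
        omega
      conv_lhs => rw [← hsplit]
      have henum : PySem.List.enumerate
          (pvStarts (lines.takeWhile (fun x => !pvDel x) ++ l :: rest)) =
          ((0 : Int), ((lines.takeWhile (fun x => !pvDel x)).length : Int)) ::
            (PySem.List.enumerate (pvStarts rest)).map
              (fun q => (q.1 + 1, q.2 +
                (((lines.takeWhile (fun x => !pvDel x)).length : Int) + 1))) := by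
        rw [pvStarts_decomp _ l rest hpre hl, PySem.List.enumerate_cons]
        simp only [zero_add]
        rw [pvEnumMap, pvEnumShift (pvStarts rest) 1, List.map_map]
        simp [Function.comp_def]
      rw [henum, List.foldl_cons, List.foldl_map]
      rw [pvStepB_first _ l rest hpre hl d]
      rw [PySem.List.foldl_congr_mem _ _
        (pvStepB rest (pvStarts rest)) _
        (by
          intro acc q hq
          rw [PySem.List.mem_enumerate_iff] at hq
          obtain ⟨k, hk, rfl⟩ := hq
          obtain ⟨j, hj, hkj⟩ := pvStarts_natCast rest _ (List.getElem_mem hk)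
          simp only [zero_add, hkj]
          exact pvStepB_shift _ l rest hpre hl acc k j hk)]
      rw [ih rest hrestlen]
      rw [pvGo]

-- ===== VERDICT (by name: the statement is the Claim_ definition above) =====
theorem section_output_py_spec : Claim_equal_section_output_py := by
  intro output _
  unfold Spec_section_output_py
  rw [sectionA_eq, sectionB_eq, foldA_eq_go,
    foldB_eq_go ((PySem.Str.split? (PySem.Str.strip output) "\n").getD []).length _ le_rfl]
  rfl
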